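-- pv_equiv track=rewrite | github.com/Chekintakathashraf/gfg-code | test /44.py | build_char_prefix
-- ===== SOURCE A (Python) =====
-- def build_char_prefix(s):
--
--     freeq_prefix = {}
--
--     for ch in set(s):  # only unique characters
--         freeq_prefix[ch] = [0] * len(s)
--
--     for i in range(len(s)):
--         current = s[i]
--         for ch in freeq_prefix:
--             if i == 0:
--                 freeq_prefix[ch][i] = 1 if ch == current else 0
--             else:
--                 freeq_prefix[ch][i] = freeq_prefix[ch][i - 1] + (1 if ch == current else 0)
--
--     return freeq_prefix
-- ===== SOURCE B (Python) =====
-- def build_char_prefix(s):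
--     n = len(s)
--     positions = {}
--     for i in range(n):
--         positions.setdefault(s[i], []).append(i)
--     result = {}
--     for c in set(s):
--         row = []
--         cnt = 0
--         prev = 0
--         for p in positions[c]:
--             row += [cnt] * (p - prev)
--             cnt += 1
--             prev = p
--         row += [cnt] * (n - prev)
--         result[c] = row
--     return result
-- ===== Notes on version B (the rewrite author's own statement) =====
-- stated objective: alternative
-- what changed: B first records each character's occurrence-index list in one pass over s, then builds each row by run-length expansion ([cnt]*gap blocks between consecutive occurrences), instead of A's dynamic-programming table fill where every cell is computed from the previous cell of its row via dict and list indexing.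
import Mathlib
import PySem

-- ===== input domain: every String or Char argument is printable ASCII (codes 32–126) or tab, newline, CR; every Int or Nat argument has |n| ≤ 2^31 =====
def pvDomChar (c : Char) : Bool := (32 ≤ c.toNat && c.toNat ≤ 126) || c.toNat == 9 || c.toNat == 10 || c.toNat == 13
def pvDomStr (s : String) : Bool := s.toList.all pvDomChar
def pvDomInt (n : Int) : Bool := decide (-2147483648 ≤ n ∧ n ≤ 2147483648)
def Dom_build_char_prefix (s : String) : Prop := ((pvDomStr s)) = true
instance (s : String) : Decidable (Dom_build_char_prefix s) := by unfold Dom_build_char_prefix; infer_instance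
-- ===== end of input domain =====

-- B records each character's occurrence-index list in one pass and then builds each row by
-- run-length expansion between consecutive occurrences, instead of A's table fill where every
-- cell is computed from the previous cell of its row (alternative algorithm, same output).

-- a Python character is a 1-character string
def pvKey (c : Char) : String := String.ofList [c]

-- ===== PORT A =====
def build_char_prefix (s : String) : List (String × List Int) :=
  let cs := s.toList
  -- freeq_prefix = {}; for ch in set(s): freeq_prefix[ch] = [0] * len(s)
  let init : PySem.Dict String (List Int) :=
    (PySem.Set.ofList cs).foldl
      (fun d ch => d.insert (pvKey ch) (List.replicate cs.length (0 : Int)))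
      PySem.Dict.empty
  -- for i in range(len(s)): current = s[i]; for ch in freeq_prefix: …
  let final : PySem.Dict String (List Int) :=
    (PySem.List.pyRange 0 (cs.length : Int) 1).foldl
      (fun d i =>
        let current : String := pvKey (PySem.List.pyGetD cs i ' ')  -- s[i], i ∈ range(len(s))
        d.keys.foldl
          (fun d' ch =>
            d'.modify ch []  -- key always present; the in-place cell assignment is pySetD
              (fun arr =>
                if i = 0 then
                  PySem.List.pySetD arr i (if ch = current then 1 else 0)
                else
                  PySem.List.pySetD arr i
                    (PySem.List.pyGetD arr (i - 1) 0 + (if ch = current then 1 else 0))))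
          d)
      init
  final.items

-- ===== PORT B =====
-- positions = {}; for i in range(n): positions.setdefault(s[i], []).append(i)
def pvPositions (cs : List Char) : PySem.Dict String (List Int) :=
  (PySem.List.pyRange 0 (cs.length : Int) 1).foldl
    (fun d i =>
      let k := pvKey (PySem.List.pyGetD cs i ' ')
      d.insert k (d.getD k [] ++ [i]))
    PySem.Dict.empty

-- row = []; cnt = 0; prev = 0; for p in ps: row += [cnt]*(p-prev); cnt += 1; prev = p
-- row += [cnt]*(n-prev)          ([x]*k with k ≤ 0 is [], matched by .toNat)
def pvRowFromPos (n : Int) (ps : List Int) : List Int :=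
  let st := ps.foldl
    (fun (st : List Int × Int × Int) p =>
      (st.1 ++ List.replicate (p - st.2.2).toNat st.2.1, st.2.1 + 1, p))
    (([] : List Int), (0 : Int), (0 : Int))
  st.1 ++ List.replicate (n - st.2.2).toNat st.2.1

def build_char_prefix_alt (s : String) : List (String × List Int) :=
  let cs := s.toList
  let pos := pvPositions cs
  -- result = {}; for c in set(s): result[c] = row built from positions[c]
  ((PySem.Set.ofList cs).foldl
      (fun d c => d.insert (pvKey c) (pvRowFromPos (cs.length : Int) (pos.getD (pvKey c) [])))
      (PySem.Dict.empty : PySem.Dict String (List Int))).items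

-- ===== PRECONDITION & SPEC =====
def Spec_build_char_prefix (s : String) (out : List (String × List Int)) : Prop := out = build_char_prefix_alt s
instance (s : String) (out : List (String × List Int)) : Decidable (Spec_build_char_prefix s out) := by unfold Spec_build_char_prefix; infer_instance

-- ===== CLAIM (what is proved, stated in full; the proofs are below) =====
def Claim_equal_build_char_prefix : Prop := ∀ (s : String), Dom_build_char_prefix s → Spec_build_char_prefix s (build_char_prefix s)

-- ===== LEMMAS AND PROOFS =====

theorem pvKey_inj {a b : Char} (h : pvKey a = pvKey b) : a = b := by
  simpa [pvKey] using congrArg String.toList h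

-- prefix-count list: position j holds the count of c among the first j+1 characters
def pvP (c : Char) (cs : List Char) (m : Nat) : List Int :=
  (List.range m).map (fun j => ((cs.take (j + 1)).count c : Int))

-- occurrence indices of c in cs
def pvOcc (c : Char) (cs : List Char) : List Nat :=
  (List.range cs.length).filter (fun j => cs.getD j ' ' = c)

-- a dict with Nodup keys is its key list paired with its lookups
theorem pv_items_eq_map_keys (d : PySem.Dict String (List Int)) (h : d.keys.Nodup) :
    d.items = d.keys.map (fun k => (k, d.getD k [])) := by
  have : d.keys = d.items.map (·.1) := rfl
  rw [this, List.map_map]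
  symm
  refine (List.map_congr_left ?_).trans (List.map_id d.items)
  intro p hp
  have := PySem.Dict.getD_of_mem_items (d := d) (d0 := []) (by simpa using hp) h
  simp [Function.comp, this]

-- folding modify over a Nodup key list updates each present key exactly once
theorem pv_getD_foldl_modify (f : String → List Int → List Int) :
    ∀ (l : List String), l.Nodup → ∀ (d : PySem.Dict String (List Int)) (k : String),
      (l.foldl (fun d' ch => d'.modify ch [] (f ch)) d).getD k []
        = if k ∈ l then f k (d.getD k []) else d.getD k [] := by
  intro l
  induction l with
  | nil => intro _ d k; simp
  | cons c tl ih =>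
    intro hnd d k
    have hnd' := hnd.of_cons
    have hc : c ∉ tl := (List.nodup_cons.mp hnd).1
    simp only [List.foldl_cons]
    rw [ih hnd']
    by_cases hk : k = c
    · subst hk
      simp [hc, PySem.Dict.getD_modify_self]
    · simp [hk, PySem.Dict.getD_modify]

theorem pv_update_self (s : List String) (hnd : s.Nodup) : PySem.Set.update s s = s := by
  rw [PySem.Set.update_eq_append_filter]
  rw [show PySem.Set.ofList s = s from PySem.Set.ofList_eq_self_of_nodup s hnd]
  have h : List.filter (fun y => !PySem.Set.contains s y) s = [] :=
    List.filter_eq_nil_iff.mpr (fun y hy => by simp [hy])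
  simp

-- one pass of A's inner loop acts entrywise on the items list
theorem pv_update_items (f : String → List Int → List Int)
    (km : List String) (hnd : km.Nodup)
    (d : PySem.Dict String (List Int)) (g : String → List Int)
    (hit : d.items = km.map fun k => (k, g k)) :
    (d.keys.foldl (fun d' ch => d'.modify ch [] (f ch)) d).items
      = km.map fun k => (k, f k (g k)) := by
  have hkeys : d.keys = km := by
    show d.items.map (·.1) = km
    rw [hit, List.map_map]; exact List.map_id'' (congrFun rfl) km
  have hknd : d.keys.Nodup := hkeys ▸ hnd
  have hres_keys :
      (d.keys.foldl (fun d' ch => d'.modify ch [] (f ch)) d).keys = km := by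
    rw [PySem.Dict.keys_foldl_modify d.keys [] (fun _ ch => f ch) d, hkeys, pv_update_self km hnd]
  have hres_nd : (d.keys.foldl (fun d' ch => d'.modify ch [] (f ch)) d).keys.Nodup :=
    hres_keys ▸ hnd
  rw [pv_items_eq_map_keys _ hres_nd, hres_keys]
  refine List.map_congr_left ?_
  intro k hk
  rw [pv_getD_foldl_modify f d.keys hknd d k]
  have hmem : (k, g k) ∈ d.items := by
    rw [hit]; exact List.mem_map_of_mem hk
  have hdk : d.getD k [] = g k := PySem.Dict.getD_of_mem_items d hmem hknd []
  simp [hkeys, hk, hdk]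

-- the whole outer loop acts entrywise
theorem pv_loop_items (step : Int → String → List Int → List Int)
    (km : List String) (hnd : km.Nodup) :
    ∀ (I : List Int) (d : PySem.Dict String (List Int)) (g : String → List Int),
      d.items = (km.map fun k => (k, g k)) →
      (I.foldl (fun d i => d.keys.foldl (fun d' ch => d'.modify ch [] (step i ch)) d) d).items
        = km.map fun k => (k, I.foldl (fun arr i => step i k arr) (g k)) := by
  intro I
  induction I with
  | nil => intro d g hit; simpa using hit
  | cons i tl ih =>
    intro d g hit
    simp only [List.foldl_cons]
    exact ih _ (fun k => step i k (g k)) (pv_update_items (step i) km hnd d g hit)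

-- A's row-update loop fills the prefix counts left to right
theorem pv_aRow_go (c : Char) (cs : List Char) :
    ∀ (k : Nat), k ≤ cs.length →
      ((List.range k).foldl
        (fun arr (j : Nat) =>
          if (j : Int) = 0 then
            PySem.List.pySetD arr (j : Int)
              (if pvKey c = pvKey (PySem.List.pyGetD cs (j : Int) ' ') then 1 else 0)
          else
            PySem.List.pySetD arr (j : Int)
              (PySem.List.pyGetD arr ((j : Int) - 1) 0 +
                (if pvKey c = pvKey (PySem.List.pyGetD cs (j : Int) ' ') then 1 else 0)))
        (List.replicate cs.length (0 : Int)))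
      = pvP c cs k ++ List.replicate (cs.length - k) 0 := by
  intro k
  induction k with
  | zero => intro _; simp [pvP]
  | succ k ih =>
    intro hk1
    have hk : k < cs.length := hk1
    rw [List.range_succ, List.foldl_append, ih (le_of_lt hk)]
    simp only [List.foldl_cons, List.foldl_nil]
    have hcur : PySem.List.pyGetD cs (k : Int) ' ' = cs[k] := by
      rw [PySem.List.pyGetD_natCast]
      exact List.getD_eq_getElem cs ' ' hk
    have hind : (if pvKey c = pvKey (PySem.List.pyGetD cs (k : Int) ' ') then (1:Int) else 0)
        = if cs[k] = c then 1 else 0 := by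
      rw [hcur]
      by_cases h : cs[k] = c
      · simp [h]
      · have : pvKey c ≠ pvKey cs[k] := fun hq => h (pvKey_inj hq).symm
        simp [h, this]
    have hlenP : (pvP c cs k).length = k := by simp [pvP]
    have htake : (cs.take (k + 1)).count c
        = (cs.take k).count c + (if cs[k] = c then 1 else 0) := by
      rw [List.take_add_one, List.getElem?_eq_getElem hk]
      simp only [Option.toList_some, List.count_append, List.count_cons, List.count_nil]
      by_cases h : cs[k] = c <;> simp [h]
    have hP1 : pvP c cs (k + 1)
        = pvP c cs k ++ [((cs.take k).count c + (if cs[k] = c then (1:Int) else 0))] := by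
      simp only [pvP, List.range_succ, List.map_append, List.map_cons, List.map_nil]
      rw [htake]
      push_cast
      ring_nf
    have hrep : List.replicate (cs.length - k) (0:Int)
        = 0 :: List.replicate (cs.length - (k+1)) 0 := by
      have : cs.length - k = (cs.length - (k+1)) + 1 := by omega
      rw [this, List.replicate_succ]
    by_cases h0 : k = 0
    · subst h0
      rw [if_pos (by norm_num)]
      rw [PySem.List.pySetD_natCast]
      rw [hind, hP1, hrep]
      simp [pvP]
    · rw [if_neg (by exact_mod_cast h0)]
      rw [PySem.List.pySetD_natCast]
      have hcast : ((k : Int) - 1) = ((k - 1 : Nat) : Int) := by omega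
      rw [hcast, PySem.List.pyGetD_natCast]
      have hgd : (pvP c cs k ++ List.replicate (cs.length - k) 0).getD (k-1) 0
          = ((cs.take k).count c : Int) := by
        rw [List.getD_append _ _ _ _ (by omega)]
        have : (k - 1) + 1 = k := by omega
        simp [pvP, List.getD_eq_getElem?_getD, List.getElem?_map,
          List.getElem?_range (show k - 1 < k by omega), this]
      rw [hgd, hind, hP1, hrep]
      rw [show (pvP c cs k ++ 0 :: List.replicate (cs.length - (k+1)) (0:Int)).set k
            ((cs.take k).count c + (if cs[k] = c then (1:Int) else 0))
          = pvP c cs k ++ (((cs.take k).count c + (if cs[k] = c then (1:Int) else 0))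
              :: List.replicate (cs.length - (k+1)) 0) from ?_]
      · simp
      · rw [List.set_append_right _ _ (by omega)]
        simp [hlenP]

-- A's full row (as extracted by pv_loop_items) is the prefix-count list
theorem pv_aRow_eq (c : Char) (cs : List Char) :
    (PySem.List.pyRange 0 (cs.length : Int) 1).foldl
      (fun arr i =>
        if i = 0 then
          PySem.List.pySetD arr i
            (if pvKey c = pvKey (PySem.List.pyGetD cs i ' ') then 1 else 0)
        else
          PySem.List.pySetD arr i
            (PySem.List.pyGetD arr (i - 1) 0 +
              (if pvKey c = pvKey (PySem.List.pyGetD cs i ' ') then 1 else 0)))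
      (List.replicate cs.length (0 : Int))
    = pvP c cs cs.length := by
  rw [PySem.List.pyRange_one, List.foldl_map]
  simp only [Int.sub_zero, Int.toNat_natCast, zero_add]
  rw [pv_aRow_go c cs cs.length (le_refl _)]
  simp

-- B's positions dict holds, at each character's key, its occurrence indices
theorem pv_pos_go (cs : List Char) (c : Char) :
    ∀ (l : List Nat) (d : PySem.Dict String (List Int)),
      (l.foldl (fun d (j : Nat) =>
          let k := pvKey (PySem.List.pyGetD cs (j : Int) ' ')
          d.insert k (d.getD k [] ++ [(j : Int)])) d).getD (pvKey c) []
      = d.getD (pvKey c) []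
          ++ (l.filter (fun j => cs.getD j ' ' = c)).map (fun j => ((j : Nat) : Int)) := by
  intro l
  induction l with
  | nil => intro d; simp
  | cons j tl ih =>
    intro d
    simp only [List.foldl_cons]
    rw [ih]
    rw [PySem.List.pyGetD_natCast]
    by_cases h : cs.getD j ' ' = c
    · have h' : cs[j]?.getD ' ' = c := h
      rw [h]
      simp [h']
    · have hne : pvKey c ≠ pvKey (cs.getD j ' ') := fun hq => h (pvKey_inj hq).symm
      have h' : ¬ cs[j]?.getD ' ' = c := h
      have hne' : pvKey c ≠ pvKey (cs[j]?.getD ' ') := hne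
      simp [PySem.Dict.getD_insert, hne', h']

theorem pv_positions_getD (cs : List Char) (c : Char) :
    (pvPositions cs).getD (pvKey c) [] = (pvOcc c cs).map (fun j => ((j : Nat) : Int)) := by
  unfold pvPositions
  rw [PySem.List.pyRange_one, List.foldl_map]
  simp only [Int.sub_zero, Int.toNat_natCast, zero_add]
  rw [pv_pos_go cs c (List.range cs.length) PySem.Dict.empty]
  simp [pvOcc]

-- run-length expansion over an increasing occurrence list produces the running counts
theorem pv_exp (n : Nat) :
    ∀ (ps : List Nat), ps.Pairwise (· < ·) →
      ∀ (prevN cntN : Nat) (acc : List Int),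
        (∀ p ∈ ps, prevN ≤ p ∧ p < n) → prevN ≤ n →
        (let st := (ps.map (fun j => ((j : Nat) : Int))).foldl
            (fun (st : List Int × Int × Int) p =>
              (st.1 ++ List.replicate (p - st.2.2).toNat st.2.1, st.2.1 + 1, p))
            (acc, (cntN : Int), (prevN : Int))
         st.1 ++ List.replicate (((n : Nat) : Int) - st.2.2).toNat st.2.1)
        = acc ++ (List.range' prevN (n - prevN)).map
            (fun j => ((cntN + ps.countP (fun p => p ≤ j) : Nat) : Int)) := by
  intro ps
  induction ps with
  | nil =>
    intro _ prevN cntN acc _ hpn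
    simp only [List.map_nil, List.foldl_nil, List.countP_nil, Nat.add_zero]
    rw [Int.toNat_sub]
    rw [show (List.range' prevN (n - prevN)).map (fun _ => ((cntN : Nat) : Int))
        = List.replicate (n - prevN) ((cntN : Nat) : Int) by
      simp [List.map_const']]
  | cons p tl ih =>
    intro hpw prevN cntN acc hb hpn
    have hp := hb p (List.mem_cons_self)
    have htl_lt : ∀ q ∈ tl, p < q := fun q hq => (List.pairwise_cons.mp hpw).1 q hq
    simp only [List.map_cons, List.foldl_cons]
    rw [show ((p : Int) - (prevN : Int)).toNat = p - prevN from Int.toNat_sub p prevN]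
    have ihres := ih (List.pairwise_cons.mp hpw).2 p (cntN + 1)
      (acc ++ List.replicate (p - prevN) ((cntN : Nat) : Int))
      (fun q hq => ⟨le_of_lt (htl_lt q hq), (hb q (List.mem_cons_of_mem p hq)).2⟩)
      (le_of_lt hp.2)
    have hcast1 : ((cntN : Nat) : Int) + 1 = (((cntN + 1 : Nat)) : Int) := by push_cast; ring
    rw [hcast1, ihres]
    -- split the target range at p
    have hsplit : List.range' prevN (n - prevN)
        = List.range' prevN (p - prevN) ++ List.range' p (n - p) := by
      have h2 : prevN + (p - prevN) = p := by omega
      calc List.range' prevN (n - prevN)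
          = List.range' prevN ((p - prevN) + (n - p)) := by
            rw [show n - prevN = (p - prevN) + (n - p) by omega]
        _ = List.range' prevN (p - prevN) ++ List.range' (prevN + (p - prevN)) (n - p) :=
            (List.range'_append_1 (s := prevN) (m := p - prevN) (n := n - p)).symm
        _ = List.range' prevN (p - prevN) ++ List.range' p (n - p) := by rw [h2]
    rw [hsplit, List.map_append, List.append_assoc]
    congr 1
    congr 1
    · -- segment before p: no occurrence of p::tl is ≤ j
      symm
      rw [show List.replicate (p - prevN) ((cntN : Nat) : Int)
          = (List.range' prevN (p - prevN)).map (fun _ => ((cntN : Nat) : Int)) by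
        simp [List.map_const']]
      refine List.map_congr_left ?_
      intro j hj
      have hjlt : j < p := by
        have := (List.mem_range'_1.mp hj).2
        omega
      have hz : (p :: tl).countP (fun q => q ≤ j) = 0 := by
        rw [List.countP_eq_zero]
        intro q hq
        rcases List.mem_cons.mp hq with rfl | hq'
        · simp; omega
        · have := htl_lt q hq'; simp; omega
      rw [hz]
      simp
    · -- segment from p on: p counts once
      refine List.map_congr_left ?_
      intro j hj
      have hjge : p ≤ j := (List.mem_range'_1.mp hj).1
      have hone : (p :: tl).countP (fun q => q ≤ j)
          = 1 + tl.countP (fun q => q ≤ j) := by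
        rw [List.countP_cons]
        simp [hjge]
        omega
      rw [hone]
      congr 1
      omega

-- counting occurrences up to j equals the prefix count
theorem pv_count_range (c : Char) (cs : List Char) :
    ∀ (m : Nat), m ≤ cs.length →
      (List.range m).countP (fun i => cs.getD i ' ' = c) = (cs.take m).count c := by
  intro m
  induction m with
  | zero => intro _; simp
  | succ m ih =>
    intro hm
    have hmlt : m < cs.length := hm
    rw [List.range_succ, List.countP_append, ih (le_of_lt hmlt)]
    rw [List.take_add_one, List.getElem?_eq_getElem hmlt]
    simp only [Option.toList_some, List.count_append, List.count_cons, List.count_nil]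
    have hgm : cs[m]?.getD ' ' = cs[m] := List.getD_eq_getElem cs ' ' hmlt
    by_cases h : cs[m] = c <;> simp [hgm, h]

theorem pv_occ_countP (c : Char) (cs : List Char) (j : Nat) (hj : j < cs.length) :
    (pvOcc c cs).countP (fun p => p ≤ j) = (cs.take (j + 1)).count c := by
  unfold pvOcc
  rw [List.countP_filter]
  have hsplit : List.range cs.length
      = List.range (j + 1) ++ (List.range (cs.length - (j + 1))).map ((j + 1) + ·) := by
    rw [← List.range_add]
    congr 1
    omega
  rw [hsplit, List.countP_append, List.countP_map]
  have h2 : (List.range (cs.length - (j + 1))).countP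
      ((fun i => decide (i ≤ j) && decide (cs.getD i ' ' = c)) ∘ ((j + 1) + ·)) = 0 := by
    rw [List.countP_eq_zero]
    intro x _
    simp [Function.comp]
    omega
  rw [h2, Nat.add_zero]
  rw [show (List.range (j + 1)).countP (fun i => decide (i ≤ j) && decide (cs.getD i ' ' = c))
      = (List.range (j + 1)).countP (fun i => cs.getD i ' ' = c) from
    List.countP_congr (fun i hi => by
      have : i ≤ j := by have := List.mem_range.mp hi; omega
      simp [this])]
  exact pv_count_range c cs (j + 1) hj

-- B's row from the occurrence list is the prefix-count list
theorem pv_bRow_eq (c : Char) (cs : List Char) :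
    pvRowFromPos (cs.length : Int) ((pvPositions cs).getD (pvKey c) []) = pvP c cs cs.length := by
  rw [pv_positions_getD]
  unfold pvRowFromPos
  have hpw : (pvOcc c cs).Pairwise (· < ·) :=
    (List.pairwise_lt_range).filter _
  have hb : ∀ p ∈ pvOcc c cs, 0 ≤ p ∧ p < cs.length := by
    intro p hp
    have := List.mem_range.mp (List.mem_of_mem_filter hp)
    omega
  have := pv_exp cs.length (pvOcc c cs) hpw 0 0 [] hb (Nat.zero_le _)
  simp only [Nat.cast_zero] at this
  rw [this]
  simp only [Nat.sub_zero, List.nil_append, Nat.zero_add]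
  rw [show List.range' 0 cs.length = List.range cs.length from List.range_eq_range'.symm]
  unfold pvP
  refine List.map_congr_left ?_
  intro j hj
  rw [pv_occ_countP c cs j (List.mem_range.mp hj)]

-- nodup of the string-key list
theorem pv_km_nodup (cs : List Char) : ((PySem.Set.ofList cs).map pvKey).Nodup :=
  (PySem.Set.nodup_ofList cs).map (fun _ _ h => pvKey_inj h)

-- ===== VERDICT (by name: the statement is the Claim_ definition above) =====
theorem build_char_prefix_spec : Claim_equal_build_char_prefix := by
  unfold Claim_equal_build_char_prefix
  intro s _
  unfold Spec_build_char_prefix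
  simp only [build_char_prefix, build_char_prefix_alt]
  have hfreshA : ∀ a ∈ PySem.Set.ofList s.toList,
      (PySem.Dict.empty : PySem.Dict String (List Int)).contains (pvKey a) = false := by
    intro a _; simp
  have hinit :
      ((PySem.Set.ofList s.toList).foldl
        (fun d ch => d.insert (pvKey ch) (List.replicate s.toList.length (0 : Int)))
        PySem.Dict.empty).items
      = ((PySem.Set.ofList s.toList).map pvKey).map
          (fun k => (k, List.replicate s.toList.length (0 : Int))) := by
    rw [PySem.Dict.items_foldl_insert_fresh (PySem.Set.ofList s.toList) pvKey _ PySem.Dict.empty hfreshA (pv_km_nodup s.toList)]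
    simp [List.map_map, Function.comp_def,
      show (PySem.Dict.empty : PySem.Dict String (List Int)).items = [] from rfl]
  have hB :
      ((PySem.Set.ofList s.toList).foldl
        (fun d c => d.insert (pvKey c)
          (pvRowFromPos (s.toList.length : Int) ((pvPositions s.toList).getD (pvKey c) [])))
        (PySem.Dict.empty : PySem.Dict String (List Int))).items
      = (PySem.Set.ofList s.toList).map
          (fun c => (pvKey c,
            pvRowFromPos (s.toList.length : Int) ((pvPositions s.toList).getD (pvKey c) []))) := by
    rw [PySem.Dict.items_foldl_insert_fresh (PySem.Set.ofList s.toList) pvKey _ PySem.Dict.empty hfreshA (pv_km_nodup s.toList)]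
    simp [show (PySem.Dict.empty : PySem.Dict String (List Int)).items = [] from rfl]
  have hloop := pv_loop_items
    (fun i ch arr =>
      if i = 0 then
        PySem.List.pySetD arr i (if ch = pvKey (PySem.List.pyGetD s.toList i ' ') then 1 else 0)
      else
        PySem.List.pySetD arr i
          (PySem.List.pyGetD arr (i - 1) 0 +
            (if ch = pvKey (PySem.List.pyGetD s.toList i ' ') then 1 else 0)))
    ((PySem.Set.ofList s.toList).map pvKey) (pv_km_nodup s.toList)
    (PySem.List.pyRange 0 (s.toList.length : Int) 1) _
    (fun _ => List.replicate s.toList.length (0 : Int)) hinit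
  rw [hloop, hB, List.map_map]
  refine List.map_congr_left ?_
  intro c _
  simp only [Function.comp]
  rw [pv_aRow_eq c s.toList, pv_bRow_eq c s.toList]
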